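-- pv_equiv track=rewrite | github.com/yasaminaali/AI-in-3D-Printing | src/zones.py | zones_checkerboard
-- ===== SOURCE A (Python) =====
-- from typing import Dict, Tuple, List
--
-- Coord = Tuple[int, int]
--
-- def zones_checkerboard(W: int, H: int, kx: int = 2, ky: int = 2) -> Dict[Coord, int]:
--     cell_w = max(1, W // (kx * 2))
--     cell_h = max(1, H // (ky * 2))
--     z: Dict[Coord, int] = {}
--     for y in range(H):
--         by = (y // cell_h) % (2 * ky)
--         for x in range(W):
--             bx = (x // cell_w) % (2 * kx)
--             z[(x, y)] = (bx + by) % 2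
--     return z
-- ===== SOURCE B (Python) =====
-- def zones_checkerboard(W, H, kx=2, ky=2):
--     cell_w = max(1, W // (kx * 2))
--     cell_h = max(1, H // (ky * 2))
--     if H <= 0:
--         return {}
--     # build one column-parity row by blocks: runs of cell_w equal values, no per-cell division
--     col = []
--     nblocks = (W + cell_w - 1) // cell_w
--     for b in range(nblocks):
--         col.extend([b % 2] * min(cell_w, W - b * cell_w))
--     rows = (col, [1 - c for c in col])
--     z = {}
--     for y in range(H):
--         row = rows[(y // cell_h) % 2]
--         for x, v in enumerate(row):
--             z[(x, y)] = v
--     return z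
-- ===== Notes on version B (the rewrite author's own statement) =====
-- stated objective: alternative
-- what changed: B precomputes the column-parity pattern once as runs of cell_w equal values (using (v%(2k))%2 == v%2) plus its flipped copy, then fills each row by enumerating the precomputed pattern, instead of recomputing two floor-divisions and two modulos per cell.
import Mathlib
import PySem

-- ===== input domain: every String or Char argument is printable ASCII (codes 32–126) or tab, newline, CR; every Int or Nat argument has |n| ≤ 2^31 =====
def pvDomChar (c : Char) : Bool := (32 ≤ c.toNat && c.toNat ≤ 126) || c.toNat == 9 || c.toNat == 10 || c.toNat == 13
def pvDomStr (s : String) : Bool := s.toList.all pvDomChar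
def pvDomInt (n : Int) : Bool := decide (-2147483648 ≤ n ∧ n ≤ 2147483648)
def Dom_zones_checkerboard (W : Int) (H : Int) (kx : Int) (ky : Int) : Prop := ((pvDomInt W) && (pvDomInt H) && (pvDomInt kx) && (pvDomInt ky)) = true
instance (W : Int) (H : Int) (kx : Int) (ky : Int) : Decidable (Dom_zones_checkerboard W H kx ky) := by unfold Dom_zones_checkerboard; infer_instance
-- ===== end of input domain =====

-- B builds the column-parity pattern once by blocks (runs of equal values) and fills rows from it
-- and its flipped copy; proved to return A's exact value whenever kx ≠ 0 and ky ≠ 0 (else A raises).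


-- ===== PORT A =====
def zones_checkerboard (W : Int) (H : Int) (kx : Int) (ky : Int) : List (Int × Int × Int) :=
  let cell_w := max 1 (PySem.Int.floordiv W (kx * 2))
  let cell_h := max 1 (PySem.Int.floordiv H (ky * 2))
  let z : PySem.Dict (Int × Int) Int :=
    (PySem.List.pyRange 0 H 1).foldl
      (fun z y =>
        let by_ := PySem.Int.mod (PySem.Int.floordiv y cell_h) (2 * ky)
        (PySem.List.pyRange 0 W 1).foldl
          (fun z x =>
            let bx := PySem.Int.mod (PySem.Int.floordiv x cell_w) (2 * kx)
            z.insert (x, y) (PySem.Int.mod (bx + by_) 2)) z)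
      PySem.Dict.empty
  z.items.map (fun p => (p.1.1, p.1.2, p.2))

-- ===== PORT B =====
def zones_checkerboard_alt (W : Int) (H : Int) (kx : Int) (ky : Int) : List (Int × Int × Int) :=
  let cell_w := max 1 (PySem.Int.floordiv W (kx * 2))
  let cell_h := max 1 (PySem.Int.floordiv H (ky * 2))
  if H ≤ 0 then [] else
  let nblocks := PySem.Int.floordiv (W + cell_w - 1) cell_w
  let col : List Int :=
    (PySem.List.pyRange 0 nblocks 1).foldl
      (fun acc b => acc ++ List.replicate (min cell_w (W - b * cell_w)).toNat (PySem.Int.mod b 2)) []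
  let rows := (col, col.map (fun c => 1 - c))
  let z : PySem.Dict (Int × Int) Int :=
    (PySem.List.pyRange 0 H 1).foldl
      (fun z y =>
        let row := if PySem.Int.mod (PySem.Int.floordiv y cell_h) 2 = 0 then rows.1 else rows.2
        (PySem.List.enumerate row 0).foldl (fun z xv => z.insert (xv.1, y) xv.2) z)
      PySem.Dict.empty
  z.items.map (fun p => (p.1.1, p.1.2, p.2))

-- ===== PRECONDITION & SPEC =====
-- Python A raises ZeroDivisionError when kx = 0 or ky = 0 (W // (kx*2) resp. % (2*ky)); B raises there too.
def Pre_zones_checkerboard (W : Int) (H : Int) (kx : Int) (ky : Int) : Prop := kx ≠ 0 ∧ ky ≠ 0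
instance (W : Int) (H : Int) (kx : Int) (ky : Int) : Decidable (Pre_zones_checkerboard W H kx ky) := by unfold Pre_zones_checkerboard; infer_instance
def pvWitness_zones_checkerboard : Int × Int × Int × Int := (8, 6, 2, 2)

def Spec_zones_checkerboard (W : Int) (H : Int) (kx : Int) (ky : Int) (out : List (Int × Int × Int)) : Prop := out = zones_checkerboard_alt W H kx ky
instance (W : Int) (H : Int) (kx : Int) (ky : Int) (out : List (Int × Int × Int)) : Decidable (Spec_zones_checkerboard W H kx ky out) := by unfold Spec_zones_checkerboard; infer_instance

-- ===== CLAIM (what is proved, stated in full; the proofs are below) =====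
def Claim_equal_zones_checkerboard : Prop := ∀ (W : Int) (H : Int) (kx : Int) (ky : Int), Dom_zones_checkerboard W H kx ky → Pre_zones_checkerboard W H kx ky → Spec_zones_checkerboard W H kx ky (zones_checkerboard W H kx ky)

-- ===== LEMMAS AND PROOFS =====

-- value identity behind B: (X % (2kx) + Y % (2ky)) % 2 depends only on X % 2 flipped by Y's parity
theorem pv_val_eq (X Y kx ky : Int) :
    PySem.Int.mod (PySem.Int.mod X (2 * kx) + PySem.Int.mod Y (2 * ky)) 2 =
    if PySem.Int.mod Y 2 = 0 then PySem.Int.mod X 2 else 1 - PySem.Int.mod X 2 := by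
  have hX := PySem.Int.floordiv_mul_add_mod X (2 * kx)
  have hY := PySem.Int.floordiv_mul_add_mod Y (2 * ky)
  set qX := PySem.Int.floordiv X (2 * kx) with hqX
  set qY := PySem.Int.floordiv Y (2 * ky) with hqY
  have hX' : PySem.Int.mod X (2 * kx) = X - 2 * (qX * kx) := by linarith [hX]
  have hY' : PySem.Int.mod Y (2 * ky) = Y - 2 * (qY * ky) := by linarith [hY]
  rw [hX', hY']
  simp only [PySem.Int.mod_eq_emod_of_pos (by norm_num : (0:Int) < 2)]
  generalize qX * kx = s at *
  generalize qY * ky = t at *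
  split_ifs with h <;> omega

-- invariant for B's block loop: after the first n blocks the list covers cells [0, min(n*cw, W))
theorem pv_col_aux (W cw : Int) (hcw : 1 ≤ cw) (nb : Int)
    (hnb : nb * cw ≤ W + cw - 1) :
    ∀ n : Nat, (n : Int) ≤ nb →
      (PySem.List.pyRange 0 (n : Int) 1).foldl
        (fun acc b => acc ++ List.replicate (min cw (W - b * cw)).toNat (PySem.Int.mod b 2)) []
      = (PySem.List.pyRange 0 (min ((n : Int) * cw) W) 1).map
          (fun x => PySem.Int.mod (PySem.Int.floordiv x cw) 2) := by
  intro n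
  induction n with
  | zero => intro _; simp [PySem.List.pyRange_one_eq_nil]
  | succ n ih =>
    intro h
    have hc : ((n + 1 : Nat) : Int) = (n : Int) + 1 := by push_cast; ring
    have h' : (n : Int) ≤ nb := by omega
    have hmul : ((n : Int) + 1) * cw ≤ nb * cw :=
      mul_le_mul_of_nonneg_right (by omega) (by omega)
    have hexp : ((n : Int) + 1) * cw = (n : Int) * cw + cw := by ring
    have hs : (n : Int) * cw + cw ≤ W + cw - 1 := by omega
    have hnn : 0 ≤ (n : Int) * cw := mul_nonneg (by omega) (by omega)
    rw [hc, PySem.List.pyRange_one_succ_right (by omega : (0:Int) ≤ (n:Int)), List.foldl_append,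
        ih h']
    simp only [List.foldl_cons, List.foldl_nil]
    have hmin : min ((n : Int) * cw) W = (n : Int) * cw := by omega
    rw [hmin]
    rw [PySem.List.pyRange_one_append 0 ((n : Int) * cw) (min (((n : Int) + 1) * cw) W)
        hnn (by omega)]
    rw [List.map_append]
    congr 1
    have hconst : ∀ x ∈ PySem.List.pyRange ((n : Int) * cw) (min (((n : Int) + 1) * cw) W) 1,
        PySem.Int.mod (PySem.Int.floordiv x cw) 2 = PySem.Int.mod (n : Int) 2 := by
      intro x hx
      rw [PySem.List.mem_pyRange_one] at hx
      have hdiv : PySem.Int.floordiv x cw = (n : Int) := by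
        rw [PySem.Int.floordiv_eq_iff_of_pos (by omega : (0:Int) < cw)]
        exact ⟨hx.1, by omega⟩
      rw [hdiv]
    rw [List.map_congr_left hconst, List.map_const', PySem.List.length_pyRange_one]
    congr 1
    omega

-- B's block-built column pattern equals A's per-cell pattern
theorem pv_col_eq (W cw : Int) (hcw : 1 ≤ cw) :
    (PySem.List.pyRange 0 (PySem.Int.floordiv (W + cw - 1) cw) 1).foldl
      (fun acc b => acc ++ List.replicate (min cw (W - b * cw)).toNat (PySem.Int.mod b 2)) []
    = (PySem.List.pyRange 0 W 1).map (fun x => PySem.Int.mod (PySem.Int.floordiv x cw) 2) := by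
  set nb := PySem.Int.floordiv (W + cw - 1) cw with hnb
  by_cases hW : W ≤ 0
  · have h1 : nb < 1 := by
      rw [hnb, PySem.Int.floordiv_lt_iff_lt_mul (by omega : (0:Int) < cw)]
      omega
    rw [PySem.List.pyRange_one_eq_nil (by omega), PySem.List.pyRange_one_eq_nil (by omega)]
    rfl
  · have hW1 : 1 ≤ W := by omega
    have hub : nb * cw ≤ W + cw - 1 := by
      rw [← PySem.Int.le_floordiv_iff_mul_le (by omega : (0:Int) < cw)]
    have hlb : W ≤ nb * cw := by
      have h2 : W + cw - 1 < (nb + 1) * cw := by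
        rw [← PySem.Int.floordiv_lt_iff_lt_mul (by omega : (0:Int) < cw)]
        omega
      nlinarith
    have hnb1 : 1 ≤ nb := by
      rw [hnb, PySem.Int.le_floordiv_iff_mul_le (by omega : (0:Int) < cw)]
      omega
    have hmain := pv_col_aux W cw hcw nb hub nb.toNat (by omega)
    rw [Int.toNat_of_nonneg (by omega)] at hmain
    rw [hmain]
    congr 2
    omega

-- enumerate of a map over a unit-step range re-creates the range as the indices
theorem pv_enumerate_map_pyRange {α : Type} (v : Int → α) (a b : Int) :
    PySem.List.enumerate ((PySem.List.pyRange a b 1).map v) a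
    = (PySem.List.pyRange a b 1).map (fun x => (x, v x)) := by
  by_cases h : b ≤ a
  · rw [PySem.List.pyRange_one_eq_nil h]; simp [PySem.List.enumerate_nil]
  · push_neg at h
    have hn : ((b - a).toNat : Int) = b - a := by omega
    induction hd : (b - a).toNat generalizing a with
    | zero => omega
    | succ n ih =>
      rw [PySem.List.pyRange_one_cons h]
      simp only [List.map_cons, PySem.List.enumerate_cons]
      by_cases h2 : b ≤ a + 1
      · have hba : b = a + 1 := by omega
        subst hba
        simp [PySem.List.pyRange_one_eq_nil (le_refl (a+1)), PySem.List.enumerate_nil]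
      · push_neg at h2
        rw [ih (a + 1) h2 (by omega) (by omega)]

-- ===== VERDICT (by name: the statement is the Claim_ definition above) =====
theorem zones_checkerboard_spec : Claim_equal_zones_checkerboard := by
  intro W H kx ky _ hpre
  unfold Spec_zones_checkerboard
  obtain ⟨hkx, hky⟩ := hpre
  simp only [zones_checkerboard, zones_checkerboard_alt]
  set cw := max 1 (PySem.Int.floordiv W (kx * 2)) with hcwdef
  set ch := max 1 (PySem.Int.floordiv H (ky * 2)) with hchdef
  have hcw1 : 1 ≤ cw := le_max_left _ _
  by_cases hH : H ≤ 0
  · rw [if_pos hH]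
    simp only [PySem.List.pyRange_one_eq_nil hH, List.foldl_nil]
    rfl
  rw [if_neg hH]
  rw [pv_col_eq W cw hcw1]
  have hfun : ∀ (z : PySem.Dict (Int × Int) Int) (y : Int),
      (PySem.List.pyRange 0 W 1).foldl
        (fun z x => z.insert (x, y)
          (PySem.Int.mod
            (PySem.Int.mod (PySem.Int.floordiv x cw) (2 * kx)
              + PySem.Int.mod (PySem.Int.floordiv y ch) (2 * ky)) 2)) z
    = (PySem.List.enumerate
        (if PySem.Int.mod (PySem.Int.floordiv y ch) 2 = 0 then
          (PySem.List.pyRange 0 W 1).map (fun x => PySem.Int.mod (PySem.Int.floordiv x cw) 2)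
        else
          ((PySem.List.pyRange 0 W 1).map (fun x => PySem.Int.mod (PySem.Int.floordiv x cw) 2)).map
            (fun c => 1 - c)) 0).foldl (fun z xv => z.insert (xv.1, y) xv.2) z := by
    intro z y
    by_cases hy : PySem.Int.mod (PySem.Int.floordiv y ch) 2 = 0
    · simp only [if_pos hy]
      rw [pv_enumerate_map_pyRange, List.foldl_map]
      simp only [pv_val_eq, if_pos hy]
    · simp only [if_neg hy]
      rw [List.map_map, pv_enumerate_map_pyRange, List.foldl_map]
      simp only [pv_val_eq, if_neg hy, Function.comp]
  simp only [hfun]
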